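-- pv_equiv track=rewrite | github.com/zhou-ran/sashimiplot | pysashimi/cigarutils.py | fetch_exon
-- ===== SOURCE A (Python) =====
-- def fetch_exon(start, cigar):
--     """
--     return the exon information, the start site must be 0-based
--     :param chrom:
--     :param start:
--     :param cigar:
--     :return:
--     """
--     exonbound = []
--
--     for c, l in cigar:
--
--         if c == 0:  # for match
--
--             exonbound.append((start, start + l))
--             start += l
--
--         elif c == 1:  # for insert
--             continue
--
--         elif c == 2:  # for del
--             start += l
--
--         elif c == 3:  # for intron
--             start += l
--
--         elif c == 4:  # soft clip
--             start += l
--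
--         else:
--             continue
--     return exonbound
-- ===== SOURCE B (Python) =====
-- def fetch_exon(start, cigar):
--     # Two-pass: first build the reference position at the start of each op,
--     # then emit (pos, pos+l) for the match ops.
--     offsets = []
--     pos = start
--     for c, l in cigar:
--         offsets.append(pos)
--         if c in (0, 2, 3, 4):
--             pos += l
--     return [(o, o + l) for o, (c, l) in zip(offsets, cigar) if c == 0]
-- ===== Notes on version B (the rewrite author's own statement) =====
-- stated objective: alternative
-- what changed: Replaces A's single interleaved loop (mutating start and appending inside an elif chain) with two passes: one pass builds an offsets table of the reference position at each op, then a filtered comprehension over zip(offsets, cigar) emits the match intervals.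
import Mathlib
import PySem

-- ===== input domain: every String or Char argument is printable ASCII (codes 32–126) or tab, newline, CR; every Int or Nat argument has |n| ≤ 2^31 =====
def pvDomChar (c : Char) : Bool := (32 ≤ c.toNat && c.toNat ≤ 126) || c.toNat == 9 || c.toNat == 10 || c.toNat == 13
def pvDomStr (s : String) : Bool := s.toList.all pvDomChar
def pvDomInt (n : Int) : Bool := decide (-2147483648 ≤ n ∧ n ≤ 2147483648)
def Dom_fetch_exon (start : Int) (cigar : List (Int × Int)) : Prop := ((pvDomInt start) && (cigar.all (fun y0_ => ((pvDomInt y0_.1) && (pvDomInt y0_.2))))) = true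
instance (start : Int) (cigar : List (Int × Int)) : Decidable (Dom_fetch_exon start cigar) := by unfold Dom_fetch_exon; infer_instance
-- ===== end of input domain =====

-- B builds an offsets table in one pass, then emits match intervals in a second filtered pass,
-- instead of A's single interleaved loop (alternative decomposition; same cost).


-- ===== PORT A =====
-- single loop over cigar carrying (start, exonbound), same branch order as A
def fetch_exon_step (st : Int × List (Int × Int)) (cl : Int × Int) : Int × List (Int × Int) :=
  let c := cl.1
  let l := cl.2
  if c = 0 then (st.1 + l, st.2 ++ [(st.1, st.1 + l)])
  else if c = 1 then st
  else if c = 2 then (st.1 + l, st.2)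
  else if c = 3 then (st.1 + l, st.2)
  else if c = 4 then (st.1 + l, st.2)
  else st

def fetch_exon (start : Int) (cigar : List (Int × Int)) : List (Int × Int) :=
  (cigar.foldl fetch_exon_step (start, [])).2

-- ===== PORT B =====
-- first pass: reference position at the start of each op
def fe_offsets (pos : Int) (cigar : List (Int × Int)) : List Int :=
  match cigar with
  | [] => []
  | (c, l) :: rest =>
      pos :: fe_offsets (if c = 0 ∨ c = 2 ∨ c = 3 ∨ c = 4 then pos + l else pos) rest

-- second pass: filtered comprehension over zip(offsets, cigar)
def fetch_exon_alt (start : Int) (cigar : List (Int × Int)) : List (Int × Int) :=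
  let offsets := fe_offsets start cigar
  (offsets.zip cigar).filterMap (fun ol =>
    if ol.2.1 = 0 then some (ol.1, ol.1 + ol.2.2) else none)

-- ===== PRECONDITION & SPEC =====
def Spec_fetch_exon (start : Int) (cigar : List (Int × Int)) (out : List (Int × Int)) : Prop := out = fetch_exon_alt start cigar
instance (start : Int) (cigar : List (Int × Int)) (out : List (Int × Int)) : Decidable (Spec_fetch_exon start cigar out) := by unfold Spec_fetch_exon; infer_instance

-- ===== CLAIM (what is proved, stated in full; the proofs are below) =====
def Claim_equal_fetch_exon : Prop := ∀ (start : Int) (cigar : List (Int × Int)), Dom_fetch_exon start cigar → Spec_fetch_exon start cigar (fetch_exon start cigar)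

-- ===== LEMMAS AND PROOFS =====
lemma fetch_exon_loop (cigar : List (Int × Int)) :
    ∀ (start : Int) (acc : List (Int × Int)),
      (cigar.foldl fetch_exon_step (start, acc)).2 = acc ++ fetch_exon_alt start cigar := by
  induction cigar with
  | nil => intro start acc; simp [fetch_exon_alt, fe_offsets]
  | cons hd tl ih =>
      intro start acc
      obtain ⟨c, l⟩ := hd
      by_cases h0 : c = 0
      · simp [fetch_exon_step, fetch_exon_alt, fe_offsets, h0, ih]
      · by_cases h1 : c = 1
        · simp [fetch_exon_step, fetch_exon_alt, fe_offsets, h0, h1, ih]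
        · by_cases h2 : c = 2
          · simp [fetch_exon_step, fetch_exon_alt, fe_offsets, h1, h2, ih]
          · by_cases h3 : c = 3
            · simp [fetch_exon_step, fetch_exon_alt, fe_offsets, h2, h3, ih]
            · by_cases h4 : c = 4
              · simp [fetch_exon_step, fetch_exon_alt, fe_offsets, h3, h4, ih]
              · simp [fetch_exon_step, fetch_exon_alt, fe_offsets, h0, h1, h2, h3, h4, ih]

-- ===== VERDICT (by name: the statement is the Claim_ definition above) =====
theorem fetch_exon_spec : Claim_equal_fetch_exon := by
  intro start cigar _
  unfold Spec_fetch_exon fetch_exon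
  simpa using fetch_exon_loop cigar start []
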